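-- pv_equiv track=rewrite | github.com/joshrule/ec | bin/autofeatures.py | shared_is_continuous
-- ===== SOURCE A (Python) =====
-- from itertools import permutations
--
-- def shared(xs, ys):
--     ixs = xs[:]
--     iys = ys[:]
--     zs = []
--     for x in ixs:
--         if x in iys:
--             zs.append(x)
--             iys.remove(x)
--     return zs
--
-- def shared_is_continuous(xs, ys):
--     zs = shared(xs, ys)
--     n = len(zs)
--     if n == 0:
--         return False
--     ps = list(permutations(zs))
--     for i in range(0, len(xs)-n+1):
--         if tuple(xs[i:i+n]) in ps:
--             return True
--     return False
-- ===== SOURCE B (Python) =====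
-- def shared_is_continuous(xs, ys):
--     counts = {}
--     for y in ys:
--         counts[y] = counts.get(y, 0) + 1
--     inter = []
--     for x in xs:
--         if counts.get(x, 0) > 0:
--             inter.append(x)
--             counts[x] = counts[x] - 1
--     n = len(inter)
--     if n == 0:
--         return False
--     key = sorted(inter)
--     return any(sorted(xs[i:i + n]) == key for i in range(len(xs) - n + 1))
-- ===== Notes on version B (the rewrite author's own statement) =====
-- stated objective: faster
-- what changed: B computes the multiset intersection with a count dictionary built from ys (no inner list scan/remove) and tests each window by comparing sorted(window) to the sorted intersection, instead of materialising all n! permutations of the intersection and testing tuple membership.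
import Mathlib
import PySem

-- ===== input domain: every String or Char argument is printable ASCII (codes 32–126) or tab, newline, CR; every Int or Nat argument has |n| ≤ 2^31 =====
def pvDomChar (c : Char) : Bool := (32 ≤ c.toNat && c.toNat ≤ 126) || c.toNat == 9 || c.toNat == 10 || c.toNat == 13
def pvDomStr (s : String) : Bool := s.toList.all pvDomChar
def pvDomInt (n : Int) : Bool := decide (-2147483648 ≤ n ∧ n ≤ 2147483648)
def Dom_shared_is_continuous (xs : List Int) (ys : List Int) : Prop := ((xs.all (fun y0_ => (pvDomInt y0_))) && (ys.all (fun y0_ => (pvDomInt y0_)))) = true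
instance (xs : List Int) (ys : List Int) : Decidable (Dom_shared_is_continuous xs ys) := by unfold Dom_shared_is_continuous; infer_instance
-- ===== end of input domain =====

-- B replaces A's list-scan intersection and n!-sized permutation enumeration by a count
-- dictionary plus sorted-window comparison (objective: faster).

-- ===== PORT A =====
-- loop of `shared`: for x in ixs: if x in iys: zs.append(x); iys.remove(x)
def pvSharedGo : List Int → List Int → List Int → List Int
  | [], _, zs => zs
  | x :: rest, iys, zs =>
    if iys.contains x then
      pvSharedGo rest ((PySem.List.remove? iys x).getD iys) (zs ++ [x])
    else
      pvSharedGo rest iys zs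

def pvShared (xs ys : List Int) : List Int := pvSharedGo xs ys []

def shared_is_continuous (xs : List Int) (ys : List Int) : Bool :=
  let zs := pvShared xs ys
  let n := zs.length
  if n == 0 then false
  else
    let ps := PySem.List.permutations zs zs.length
    (PySem.List.pyRange 0 ((xs.length : Int) - (n : Int) + 1) 1).any
      (fun i => ps.contains (PySem.List.slice xs (some i) (some (i + (n : Int)))))

-- ===== PORT B =====
-- body of Source B's intersection loop: if counts.get(x,0) > 0: inter.append(x); counts[x] -= 1
def pvStepB (p : List Int × PySem.Dict Int Int) (x : Int) : List Int × PySem.Dict Int Int :=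
  if p.2.getD x 0 > 0 then (p.1 ++ [x], p.2.insert x (p.2.getD x 0 - 1)) else p

def shared_is_continuous_alt (xs : List Int) (ys : List Int) : Bool :=
  let counts := ys.foldl (fun d y => d.insert y (d.getD y 0 + 1)) PySem.Dict.empty
  let inter := (xs.foldl pvStepB ([], counts)).1
  let n := inter.length
  if n == 0 then false
  else
    let key := PySem.List.sorted inter (fun x => x)
    (PySem.List.pyRange 0 ((xs.length : Int) - (n : Int) + 1) 1).any
      (fun i => PySem.List.sorted (PySem.List.slice xs (some i) (some (i + (n : Int)))) (fun x => x) == key)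

-- ===== PRECONDITION & SPEC =====
def Spec_shared_is_continuous (xs : List Int) (ys : List Int) (out : Bool) : Prop := out = shared_is_continuous_alt xs ys
instance (xs : List Int) (ys : List Int) (out : Bool) : Decidable (Spec_shared_is_continuous xs ys out) := by unfold Spec_shared_is_continuous; infer_instance

-- ===== CLAIM (what is proved, stated in full; the proofs are below) =====
def Claim_equal_shared_is_continuous : Prop := ∀ (xs : List Int) (ys : List Int), Dom_shared_is_continuous xs ys → Spec_shared_is_continuous xs ys (shared_is_continuous xs ys)

-- ===== LEMMAS AND PROOFS =====

theorem pvPermutationsSucc (zs : List Int) (r : Nat) :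
    PySem.List.permutations zs (r + 1) = (List.range zs.length).flatMap
      (fun i => match zs[i]? with
        | none => []
        | some a => (PySem.List.permutations (zs.eraseIdx i) r).map (a :: ·)) := by
  rw [PySem.List.permutations]
  congr 1
  funext i
  cases zs[i]? <;> rfl

theorem pvMemPermutations {p zs : List Int} (h : p.Perm zs) :
    p ∈ PySem.List.permutations zs zs.length := by
  induction p generalizing zs with
  | nil =>
    have hz : zs = [] := h.symm.eq_nil
    subst hz
    simp [PySem.List.permutations_zero]
  | cons a p ih =>
    have ha : a ∈ zs := h.subset (List.mem_cons_self)
    have hp : p.Perm (zs.erase a) := (h.trans (List.perm_cons_erase ha)).cons_inv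
    have hlen : zs.length = p.length + 1 := by
      rw [← h.length_eq]; simp
    have hidx : List.idxOf a zs < zs.length := List.idxOf_lt_length_of_mem ha
    rw [hlen, pvPermutationsSucc]
    apply List.mem_flatMap.mpr
    refine ⟨List.idxOf a zs, List.mem_range.mpr hidx, ?_⟩
    have hget : zs[List.idxOf a zs]? = some a := by
      rw [List.getElem?_eq_getElem hidx, List.getElem_idxOf]
    rw [hget]
    apply List.mem_map.mpr
    refine ⟨p, ?_, rfl⟩
    rw [List.eraseIdx_idxOf_eq_erase]
    have hl : (zs.erase a).length = p.length := by rw [← hp.length_eq]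
    rw [← hl]
    exact ih hp

theorem pvWindowTest (w zs : List Int) :
    (PySem.List.permutations zs zs.length).contains w
      = (PySem.List.sorted w (fun x => x) == PySem.List.sorted zs (fun x => x)) := by
  rw [Bool.eq_iff_iff]
  simp only [List.contains_iff_mem, beq_iff_eq, PySem.List.sorted_id_eq_sorted_id_iff_perm]
  exact ⟨PySem.List.perm_of_mem_permutations, pvMemPermutations⟩

theorem pvGreedy (xs : List Int) : ∀ (iys acc : List Int) (c : PySem.Dict Int Int),
    (∀ v : Int, c.getD v 0 = (iys.count v : Int)) →
    (xs.foldl pvStepB (acc, c)).1 = pvSharedGo xs iys acc := by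
  induction xs with
  | nil => intro iys acc c _; rfl
  | cons x rest ih =>
    intro iys acc c h
    simp only [List.foldl_cons, pvSharedGo, pvStepB]
    by_cases hx : x ∈ iys
    · have hcont : iys.contains x = true := List.contains_iff_mem.mpr hx
      have hcount : 0 < iys.count x := List.count_pos_iff.mpr hx
      have hgt : c.getD x 0 > 0 := by rw [h x]; exact_mod_cast hcount
      rw [if_pos hgt, hcont, if_pos rfl]
      have herase : (PySem.List.remove? iys x).getD iys = iys.erase x := by
        rw [PySem.List.remove?_eq_some_erase iys x hx]; rfl
      rw [herase]
      apply ih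
      intro v
      rw [PySem.Dict.getD_insert]
      by_cases hv : v = x
      · subst hv
        rw [if_pos rfl, h v, List.count_erase]
        simp only [beq_self_eq_true, if_pos]
        have h1 : 1 ≤ iys.count v := hcount
        push_cast [Nat.cast_sub h1]
        ring
      · rw [if_neg hv, h v, List.count_erase]
        have : (x == v) = false := by simp [Ne.symm hv]
        simp [this]
    · have hcont : iys.contains x = false := by
        simp [hx]
      have hc0 : c.getD x 0 = 0 := by
        rw [h x, List.count_eq_zero_of_not_mem hx]; rfl
      rw [hc0]
      simp only [gt_iff_lt, lt_irrefl, if_false, hcont, Bool.false_eq_true, if_false]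
      exact ih iys acc c h

-- ===== VERDICT (by name: the statement is the Claim_ definition above) =====
theorem shared_is_continuous_spec : Claim_equal_shared_is_continuous := by
  intro xs ys _
  show shared_is_continuous xs ys = shared_is_continuous_alt xs ys
  simp only [shared_is_continuous, shared_is_continuous_alt]
  have hinter :
      (xs.foldl pvStepB ([], ys.foldl (fun d y => d.insert y (d.getD y 0 + 1)) PySem.Dict.empty)).1
        = pvShared xs ys := by
    apply pvGreedy
    intro v
    rw [PySem.Dict.foldl_insert_getD_add_one_eq_counter, PySem.Dict.getD_counter]
  rw [hinter]
  simp only [pvWindowTest]
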